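-- pv_equiv track=rewrite | github.com/KW17-STUDY/2022-Summer-Study | GU/Kakao/2018_KAKAO_BLIND_RECRUITMENT/[1차]_비밀지도.py | solution
-- ===== SOURCE A (Python) =====
-- def makeBin(num, n):
--     result = []
--     while num!=0:
--         value, remain = divmod(num,2)
--         result.append(remain)
--         num = value
--     while len(result)!=n:
--         result.append(0)
--     return result[::-1]
--
-- def solution(n, arr1, arr2):
--     answer = [[0 for _ in range(n)] for _ in range(n)]
--     # arr1을 answer에 반영
--     for i in range(n):
--         result = makeBin(arr1[i],n)
--         answer[i] = result[:]
--
--     # arr2를 answer에 반영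
--     for i in range(n):
--         result = makeBin(arr2[i],n)
--         for j in range(n):
--             if result[j] == 1:
--                 answer[i][j] = 1
--     # 1을 '#'으로, 0을 ' '으로 변환
--     for i in range(n):
--         for j in range(n):
--             answer[i][j] = '#' if answer[i][j] == 1 else ' '
--
--     #list를 문자열로 변환
--     for i in range(n):
--         answer[i] = ''.join(answer[i])
--     return answer
-- ===== SOURCE B (Python) =====
-- def solution(n, arr1, arr2):
--     return [''.join('#' if (arr1[i] | arr2[i]) >> k & 1 else ' '
--                     for k in range(n - 1, -1, -1))
--             for i in range(n)]
-- ===== Notes on version B (the rewrite author's own statement) =====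
-- stated objective: simpler
-- what changed: B computes each row in one pass as a per-bit test on the integer OR arr1[i] | arr2[i], replacing A's hand-rolled divmod digit extraction, zero-padding loop, cellwise OR-merge pass and separate char-conversion/join passes.
import Mathlib
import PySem

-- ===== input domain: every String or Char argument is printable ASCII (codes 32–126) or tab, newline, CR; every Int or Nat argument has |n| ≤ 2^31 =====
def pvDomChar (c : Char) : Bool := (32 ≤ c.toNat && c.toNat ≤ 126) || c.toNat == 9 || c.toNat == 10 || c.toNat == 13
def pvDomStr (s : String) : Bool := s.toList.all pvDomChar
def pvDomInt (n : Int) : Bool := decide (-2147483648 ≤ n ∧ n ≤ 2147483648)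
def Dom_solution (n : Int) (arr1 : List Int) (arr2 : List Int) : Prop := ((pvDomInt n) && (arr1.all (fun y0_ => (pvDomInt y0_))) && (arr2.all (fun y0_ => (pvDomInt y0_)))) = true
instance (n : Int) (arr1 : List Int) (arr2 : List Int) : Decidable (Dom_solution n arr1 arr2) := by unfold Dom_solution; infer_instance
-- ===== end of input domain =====

-- B renders each row directly from the integer bitwise OR `arr1[i] | arr2[i]` with a per-bit
-- test, replacing A's hand-rolled divmod bit lists, padding pass, OR-merge pass and char pass
-- (objective: simpler/idiomatic; same asymptotic cost).

-- ===== PORT A =====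
-- while num != 0: divmod(num, 2), append remainder.  Python diverges for num < 0;
-- the `0 < num` guard only makes the recursion total there (those inputs are outside Pre_).
def makeBinLoop (num : Int) (result : List Int) : List Int :=
  if _h : 0 < num then
    makeBinLoop (PySem.Int.floordiv num 2) (result ++ [PySem.Int.mod num 2])
  else result
termination_by num.toNat
decreasing_by
  rw [PySem.Int.floordiv_eq_ediv_of_pos (by norm_num)]
  omega

-- while len(result) != n: append 0.  Python diverges when len(result) > n (outside Pre_);
-- the `<` guard only makes the recursion total there.
def padLoop (result : List Int) (n : Int) : List Int :=
  if h : (result.length : Int) < n then padLoop (result ++ [0]) n else result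
termination_by (n - result.length).toNat
decreasing_by simp; omega

def makeBin (num : Int) (n : Int) : List Int :=
  (padLoop (makeBinLoop num []) n).reverse          -- result[::-1]

def solution (n : Int) (arr1 : List Int) (arr2 : List Int) : List String :=
  -- answer = n×n zero matrix; each row i is then overwritten by makeBin(arr1[i], n),
  -- OR-merged cellwise with makeBin(arr2[i], n), turned into '#'/' ' chars and joined.
  (List.range n.toNat).map (fun (i : Nat) =>
    let r1 := makeBin (PySem.List.pyGetD arr1 (i : Int) 0) n
    let r2 := makeBin (PySem.List.pyGetD arr2 (i : Int) 0) n
    let row := (List.range n.toNat).map (fun (j : Nat) =>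
      if PySem.List.pyGetD r2 (j : Int) 0 = 1 then (1 : Int)
      else PySem.List.pyGetD r1 (j : Int) 0)
    String.mk (row.map (fun v => if v = 1 then '#' else ' ')))

-- ===== PORT B =====
def solution_alt (n : Int) (arr1 : List Int) (arr2 : List Int) : List String :=
  (List.range n.toNat).map (fun (i : Nat) =>
    String.mk (((List.range n.toNat).reverse).map (fun (k : Nat) =>   -- k runs over range(n-1, -1, -1)
      if PySem.Int.band
           ((PySem.Int.bor (PySem.List.pyGetD arr1 (i : Int) 0)
                            (PySem.List.pyGetD arr2 (i : Int) 0)) >>> k) 1 ≠ 0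
      then '#' else ' ')))

-- ===== PRECONDITION & SPEC =====
-- Pre_ excludes exactly the inputs where A does not return: arr1/arr2 shorter than n
-- (IndexError) and entries that are negative or ≥ 2^n (A's while-loops never terminate).
def Pre_solution (n : Int) (arr1 : List Int) (arr2 : List Int) : Prop :=
  n ≤ (arr1.length : Int) ∧ n ≤ (arr2.length : Int) ∧
  (∀ x ∈ arr1.take n.toNat, 0 ≤ x ∧ x < 2 ^ n.toNat) ∧
  (∀ x ∈ arr2.take n.toNat, 0 ≤ x ∧ x < 2 ^ n.toNat)
instance (n : Int) (arr1 : List Int) (arr2 : List Int) : Decidable (Pre_solution n arr1 arr2) := by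
  unfold Pre_solution; infer_instance

def pvWitness_solution : Int × List Int × List Int := (2, [1, 2], [2, 1])

def Spec_solution (n : Int) (arr1 : List Int) (arr2 : List Int) (out : List String) : Prop := out = solution_alt n arr1 arr2
instance (n : Int) (arr1 : List Int) (arr2 : List Int) (out : List String) : Decidable (Spec_solution n arr1 arr2 out) := by unfold Spec_solution; infer_instance

-- ===== CLAIM (what is proved, stated in full; the proofs are below) =====
def Claim_equal_solution : Prop := ∀ (n : Int) (arr1 : List Int) (arr2 : List Int), Dom_solution n arr1 arr2 → Pre_solution n arr1 arr2 → Spec_solution n arr1 arr2 (solution n arr1 arr2)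

-- ===== LEMMAS AND PROOFS =====

-- the j-th binary digit of m (LSB first), as the Int 0 or 1
def bitf (m : Nat) (j : Nat) : Int := ((m >>> j) % 2 : Nat)

theorem makeBinLoop_pos {num : Int} (h : 0 < num) (acc : List Int) :
    makeBinLoop num acc
      = makeBinLoop (PySem.Int.floordiv num 2) (acc ++ [PySem.Int.mod num 2]) := by
  rw [makeBinLoop]; simp [h]

theorem makeBinLoop_nonpos {num : Int} (h : ¬ 0 < num) (acc : List Int) :
    makeBinLoop num acc = acc := by
  rw [makeBinLoop]; simp [h]

theorem makeBinLoop_eq (num : Int) (acc : List Int) :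
    makeBinLoop num acc = acc ++ makeBinLoop num [] := by
  by_cases h : 0 < num
  · rw [makeBinLoop_pos h acc, makeBinLoop_pos h [],
        makeBinLoop_eq (PySem.Int.floordiv num 2) (acc ++ [PySem.Int.mod num 2]),
        makeBinLoop_eq (PySem.Int.floordiv num 2) ([] ++ [PySem.Int.mod num 2])]
    simp
  · rw [makeBinLoop_nonpos h acc, makeBinLoop_nonpos h []]
    simp
termination_by num.toNat
decreasing_by
  all_goals rw [PySem.Int.floordiv_eq_ediv_of_pos (by norm_num)]; omega

theorem padLoop_eq (result : List Int) (n : Int) :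
    padLoop result n = result ++ List.replicate (n.toNat - result.length) 0 := by
  by_cases h : (result.length : Int) < n
  · rw [padLoop]
    simp only [h, dite_true]
    rw [padLoop_eq (result ++ [0]) n]
    have : n.toNat - result.length = (n.toNat - (result ++ [0]).length) + 1 := by
      simp; omega
    rw [this, List.replicate_succ]
    simp
  · rw [padLoop]
    simp only [h, dite_false]
    have : n.toNat - result.length = 0 := by omega
    simp [this]
termination_by (n - result.length).toNat
decreasing_by simp; omega

theorem core (N : Nat) : ∀ m : Nat, m < 2 ^ N →
    makeBinLoop (m : Int) [] ++ List.replicate (N - (makeBinLoop (m : Int) []).length) 0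
      = (List.range N).map (bitf m) := by
  induction N with
  | zero =>
    intro m hm
    interval_cases m
    simp [makeBinLoop]
  | succ N ih =>
    intro m hm
    by_cases h0 : m = 0
    · subst h0
      rw [makeBinLoop_nonpos (by omega)]
      simp only [List.nil_append, List.length_nil, Nat.sub_zero]
      apply List.ext_getElem <;> simp [bitf]
    · have hpos : (0 : Int) < (m : Int) := by exact_mod_cast Nat.pos_of_ne_zero h0
      rw [makeBinLoop_pos hpos, makeBinLoop_eq]
      have hd : PySem.Int.floordiv (m : Int) 2 = ((m / 2 : Nat) : Int) := by
        exact_mod_cast PySem.Int.floordiv_natCast m 2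
      have hmo : PySem.Int.mod (m : Int) 2 = ((m % 2 : Nat) : Int) := by
        exact_mod_cast PySem.Int.mod_natCast m 2
      rw [hd, hmo]
      have ihm := ih (m / 2) (by omega)
    -- LHS = m%2 :: (rec ++ replicate (N - len) 0)
      simp only [List.nil_append, List.cons_append, List.length_cons,
        Nat.succ_sub_succ_eq_sub]
      rw [ihm]
      apply List.ext_getElem
      · simp
      · intro idx hl hr
        simp only [List.getElem_map, List.getElem_range]
        match idx with
        | 0 => simp [bitf]
        | (j + 1) =>
          simp only [List.getElem_cons_succ, List.getElem_map, List.getElem_range]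
          show bitf (m / 2) j = bitf m (j + 1)
          simp only [bitf]
          have hsh : m >>> (j + 1) = (m / 2) >>> j := by
            rw [Nat.shiftRight_eq_div_pow, Nat.shiftRight_eq_div_pow,
                Nat.div_div_eq_div_mul]
            congr 1
            ring
          rw [hsh]

theorem makeBin_eq (m : Nat) (n : Int) (_hn : (n.toNat : Int) = n)
    (hm : m < 2 ^ n.toNat) :
    makeBin (m : Int) n = ((List.range n.toNat).map (bitf m)).reverse := by
  unfold makeBin
  rw [padLoop_eq, core n.toNat m hm]

theorem bitf_or (a b k : Nat) :
    ((a ||| b) >>> k) % 2 = 1 ↔ (a >>> k) % 2 = 1 ∨ (b >>> k) % 2 = 1 := by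
  have h := Nat.testBit_lor a b k
  simp only [Nat.testBit_eq_decide_div_mod_eq, Nat.shiftRight_eq_div_pow] at *
  rcases Bool.decide_iff ((a ||| b) / 2 ^ k % 2 = 1) with _
  constructor
  · intro hx
    have : (decide (a / 2 ^ k % 2 = 1) || decide (b / 2 ^ k % 2 = 1)) = true := by
      rw [← h]; simpa using hx
    simpa using this
  · intro hx
    have : (decide (a / 2 ^ k % 2 = 1) || decide (b / 2 ^ k % 2 = 1)) = true := by
      simpa using hx
    rw [← h] at this
    simpa using this

theorem natCast_shiftRight (x k : Nat) : ((x : Int) >>> k) = ((x >>> k : Nat) : Int) := rfl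

theorem rev_map_range_getD (f : Nat → Int) (N j : Nat) (hj : j < N) :
    (((List.range N).map f).reverse).getD j 0 = f (N - 1 - j) := by
  rw [List.getD_eq_getElem _ _ (by simpa using hj)]
  rw [List.getElem_reverse]
  simp

-- ===== VERDICT (by name: the statement is the Claim_ definition above) =====
theorem solution_spec : Claim_equal_solution := by
  intro n arr1 arr2 _hdom hpre
  unfold Spec_solution solution solution_alt
  obtain ⟨h1, h2, hb1, hb2⟩ := hpre
  apply List.map_congr_left
  intro i hi
  rw [List.mem_range] at hi
  have hn : ((n.toNat : Nat) : Int) = n := by omega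
  have hia : i < arr1.length := by omega
  have hib : i < arr2.length := by omega
  have ha : PySem.List.pyGetD arr1 (i : Int) 0 = arr1[i] := by
    rw [PySem.List.pyGetD_natCast, List.getD_eq_getElem _ _ hia]
  have hb : PySem.List.pyGetD arr2 (i : Int) 0 = arr2[i] := by
    rw [PySem.List.pyGetD_natCast, List.getD_eq_getElem _ _ hib]
  have hmem1 : arr1[i] ∈ arr1.take n.toNat := by
    have : (arr1.take n.toNat)[i]'(by simp; omega) = arr1[i] := List.getElem_take
    exact this ▸ List.getElem_mem _
  have hmem2 : arr2[i] ∈ arr2.take n.toNat := by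
    have : (arr2.take n.toNat)[i]'(by simp; omega) = arr2[i] := List.getElem_take
    exact this ▸ List.getElem_mem _
  obtain ⟨ha0, ha2⟩ := hb1 _ hmem1
  obtain ⟨hb0, hb2'⟩ := hb2 _ hmem2
  have hacast : arr1[i] = ((arr1[i].toNat : Nat) : Int) := (Int.toNat_of_nonneg ha0).symm
  have hbcast : arr2[i] = ((arr2[i].toNat : Nat) : Int) := (Int.toNat_of_nonneg hb0).symm
  have ha2' : arr1[i].toNat < 2 ^ n.toNat := by
    have : ((2 : Int) ^ n.toNat) = (((2 ^ n.toNat : Nat) : Int)) := by push_cast; ring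
    omega
  have hb2n : arr2[i].toNat < 2 ^ n.toNat := by
    have : ((2 : Int) ^ n.toNat) = (((2 ^ n.toNat : Nat) : Int)) := by push_cast; ring
    omega
  rw [ha, hb, hacast, hbcast,
      makeBin_eq arr1[i].toNat n hn ha2', makeBin_eq arr2[i].toNat n hn hb2n]
  dsimp only
  congr 1
  rw [List.map_map]
  have hrev : (List.range n.toNat).reverse
      = (List.range n.toNat).map (fun (j : Nat) => n.toNat - 1 - j) := by
    rw [List.range_eq_range', List.reverse_range']
    simp [List.range_eq_range']
  rw [hrev, List.map_map]
  apply List.map_congr_left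
  intro j hj
  rw [List.mem_range] at hj
  simp only [Function.comp_apply]
  -- both cells reduce to the (n.toNat - 1 - j)-th bit
  rw [PySem.List.pyGetD_natCast, PySem.List.pyGetD_natCast,
      rev_map_range_getD _ _ _ hj, rev_map_range_getD _ _ _ hj]
  rw [PySem.Int.bor_natCast, natCast_shiftRight, PySem.Int.band_one]
  have hmod : PySem.Int.mod (((arr1[i].toNat ||| arr2[i].toNat) >>> (n.toNat - 1 - j) : Nat) : Int) 2
      = (((arr1[i].toNat ||| arr2[i].toNat) >>> (n.toNat - 1 - j) % 2 : Nat) : Int) := by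
    exact_mod_cast PySem.Int.mod_natCast _ 2
  rw [hmod]
  have hor := bitf_or arr1[i].toNat arr2[i].toNat (n.toNat - 1 - j)
  simp only [bitf]
  rcases Nat.mod_two_eq_zero_or_one (arr1[i].toNat >>> (n.toNat - 1 - j)) with hx1 | hx1 <;>
    rcases Nat.mod_two_eq_zero_or_one (arr2[i].toNat >>> (n.toNat - 1 - j)) with hx2 | hx2 <;>
    rcases Nat.mod_two_eq_zero_or_one ((arr1[i].toNat ||| arr2[i].toNat) >>> (n.toNat - 1 - j)) with hx3 | hx3 <;>
    rw [hx1, hx2, hx3] at hor ⊢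
  all_goals try norm_num
  all_goals exact absurd hor (by norm_num)
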